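-- pv_equiv track=rewrite | github.com/ibboiko/Neisseria_gonorrhoeae_genomes_pilE_pilS | scripts/pilS_copies_generator_with_report.py | find_stop_codon
-- ===== SOURCE A (Python) =====
-- def find_stop_codon(sequence, start_index, search_range=250):
--     stop_codons = ["taa", "tag", "tga"]
--     search_start = start_index
--     search_end = min(start_index + search_range, len(sequence))
--     search_window = sequence[search_start:search_end].lower()
--     for stop_codon in stop_codons:
--         stop_codon_pos = search_window.find(stop_codon)
--         if stop_codon_pos != -1:
--             return start_index + stop_codon_pos
--     return -1
-- ===== SOURCE B (Python) =====
-- def find_stop_codon(sequence, start_index, search_range=250):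
--     search_end = min(start_index + search_range, len(sequence))
--     window = sequence[start_index:search_end].lower()
--     first = {}
--     for i in range(len(window) - 2):
--         codon = window[i:i + 3]
--         if codon in ("taa", "tag", "tga") and codon not in first:
--             first[codon] = i
--     for codon in ("taa", "tag", "tga"):
--         if codon in first:
--             return start_index + first[codon]
--     return -1
-- ===== Notes on version B (the rewrite author's own statement) =====
-- stated objective: alternative
-- what changed: Replaces the three separate str.find scans with one linear pass over the window that records the earliest position of each stop codon in a dict, then resolves the fixed codon priority by dict lookup.
import Mathlib
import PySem

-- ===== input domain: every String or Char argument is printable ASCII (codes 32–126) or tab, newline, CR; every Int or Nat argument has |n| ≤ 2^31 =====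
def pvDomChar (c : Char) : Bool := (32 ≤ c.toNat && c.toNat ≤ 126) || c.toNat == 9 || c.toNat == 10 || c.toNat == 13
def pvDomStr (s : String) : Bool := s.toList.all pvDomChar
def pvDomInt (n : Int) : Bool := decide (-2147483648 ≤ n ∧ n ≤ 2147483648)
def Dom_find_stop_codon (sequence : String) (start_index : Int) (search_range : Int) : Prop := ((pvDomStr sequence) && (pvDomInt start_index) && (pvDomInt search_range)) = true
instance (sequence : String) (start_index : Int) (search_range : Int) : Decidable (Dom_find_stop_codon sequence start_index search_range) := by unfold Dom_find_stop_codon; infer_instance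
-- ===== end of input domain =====

-- B replaces A's three sequential str.find scans by one pass over the window that tables
-- the earliest position of each stop codon, then resolves the fixed priority by table lookup
-- (objective: alternative single-pass decomposition; not claimed faster).

-- ===== PORT A =====

-- A's for-loop over the codon list: try str.find for each codon in order.
def findLoopA (start_index : Int) (search_window : String) : List String → Int
  | [] => -1
  | stop_codon :: rest =>
    let stop_codon_pos := PySem.Str.find search_window stop_codon
    if stop_codon_pos ≠ -1 then start_index + stop_codon_pos
    else findLoopA start_index search_window rest

def find_stop_codon (sequence : String) (start_index : Int) (search_range : Int) : Int :=
  let stop_codons : List String := ["taa", "tag", "tga"]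
  let search_start := start_index
  let search_end := min (start_index + search_range) (PySem.Str.len sequence)
  let search_window := PySem.Str.lower (PySem.Str.slice sequence (some search_start) (some search_end))
  findLoopA start_index search_window stop_codons

-- ===== PORT B =====

def codonsB : List String := ["taa", "tag", "tga"]

-- B's loop body: record i for its 3-char slice if that codon is a stop codon not seen before.
def stepB (window : String) (first : PySem.Dict String Int) (i : Int) : PySem.Dict String Int :=
  if codonsB.contains (PySem.Str.slice window (some i) (some (i + 3)))
      && !(first.contains (PySem.Str.slice window (some i) (some (i + 3)))) then
    first.insert (PySem.Str.slice window (some i) (some (i + 3))) i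
  else first

-- B's single pass over the window indices.
def scanB (window : String) (idxs : List Int) : PySem.Dict String Int :=
  idxs.foldl (stepB window) PySem.Dict.empty

-- B's second loop: look the codons up in priority order.
def lookupB (start_index : Int) (first : PySem.Dict String Int) : List String → Int
  | [] => -1
  | codon :: rest =>
    match first.get? codon with
    | some v => start_index + v
    | none => lookupB start_index first rest

def find_stop_codon_alt (sequence : String) (start_index : Int) (search_range : Int) : Int :=
  let search_end := min (start_index + search_range) (PySem.Str.len sequence)
  let window := PySem.Str.lower (PySem.Str.slice sequence (some start_index) (some search_end))
  let first := scanB window (PySem.List.pyRange 0 (PySem.Str.len window - 2) 1)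
  lookupB start_index first codonsB

-- ===== PRECONDITION & SPEC =====
def Spec_find_stop_codon (sequence : String) (start_index : Int) (search_range : Int) (out : Int) : Prop := out = find_stop_codon_alt sequence start_index search_range
instance (sequence : String) (start_index : Int) (search_range : Int) (out : Int) : Decidable (Spec_find_stop_codon sequence start_index search_range out) := by unfold Spec_find_stop_codon; infer_instance

-- ===== CLAIM (what is proved, stated in full; the proofs are below) =====
def Claim_equal_find_stop_codon : Prop := ∀ (sequence : String) (start_index : Int) (search_range : Int), Dom_find_stop_codon sequence start_index search_range → Spec_find_stop_codon sequence start_index search_range (find_stop_codon sequence start_index search_range)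

-- ===== LEMMAS AND PROOFS =====

-- The scan's table keyed at a stop codon c holds the first matching index of the list.
theorem get?_foldl_stepB (window c : String) (hc : codonsB.contains c = true)
    (idxs : List Int) (d : PySem.Dict String Int) :
    (idxs.foldl (stepB window) d).get? c
      = (d.get? c).or (idxs.find? (fun i => PySem.Str.slice window (some i) (some (i + 3)) == c)) := by
  induction idxs generalizing d with
  | nil => simp
  | cons i rest ih =>
    rw [List.foldl_cons]
    by_cases heq : PySem.Str.slice window (some i) (some (i + 3)) = c
    · have hb : (PySem.Str.slice window (some i) (some (i + 3)) == c) = true := by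
        simp [heq]
      cases hget : d.get? c with
      | none =>
        have hcon : d.contains c = false := by
          rw [PySem.Dict.contains_eq_isSome_get?, hget]; rfl
        have hstep : stepB window d i = d.insert c i := by
          unfold stepB
          rw [heq, hc, hcon]
          simp
        rw [hstep, ih, PySem.Dict.get?_insert_self,
          List.find?_cons_of_pos (p := fun j => PySem.Str.slice window (some j) (some (j + 3)) == c) hb]
        simp
      | some v =>
        have hcon : d.contains c = true := by
          rw [PySem.Dict.contains_eq_isSome_get?, hget]; rfl
        have hstep : stepB window d i = d := by
          unfold stepB
          rw [heq, hcon]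
          simp
        rw [hstep, ih, hget,
          List.find?_cons_of_pos (p := fun j => PySem.Str.slice window (some j) (some (j + 3)) == c) hb]
        simp
    · have hb : (PySem.Str.slice window (some i) (some (i + 3)) == c) = false := by
        simpa using heq
      have hget : (stepB window d i).get? c = d.get? c := by
        unfold stepB
        split
        · exact PySem.Dict.get?_insert_of_ne d i (fun h => heq h.symm)
        · rfl
      rw [List.find?_cons_of_neg (p := fun j => PySem.Str.slice window (some j) (some (j + 3)) == c)
        (by simp [hb]), ih, hget]

-- On a strictly increasing list, find? returns the ≤-least element satisfying p.
theorem find?_first_sorted (l : List Int) (p : Int → Bool) (k : Int)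
    (hs : l.Pairwise (· < ·)) (hm : k ∈ l) (hp : p k = true)
    (hmin : ∀ j ∈ l, p j = true → k ≤ j) : l.find? p = some k := by
  induction l with
  | nil => cases hm
  | cons x xs ih =>
    by_cases hx : p x = true
    · have hkx : k ≤ x := hmin x List.mem_cons_self hx
      have hk : k = x := by
        rcases List.mem_cons.mp hm with rfl | hmem
        · rfl
        · exact absurd (List.rel_of_pairwise_cons hs hmem) (by omega)
      rw [List.find?_cons_of_pos hx, hk]
    · have hmem : k ∈ xs := by
        rcases List.mem_cons.mp hm with rfl | h
        · exact absurd hp hx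
        · exact h
      rw [List.find?_cons_of_neg (by simpa using hx)]
      exact ih hs.of_cons hmem (fun j hj hpj => hmin j (List.mem_cons_of_mem _ hj) hpj)

-- The 3-char window slice at a nonnegative index equals c iff c sits as a prefix there.
theorem sliceB_iff (window c : String) (hc3 : c.toList.length = 3) (i : Int) (hi : 0 ≤ i) :
    (PySem.Str.slice window (some i) (some (i + 3)) == c) = true
      ↔ c.toList <+: window.toList.drop i.toNat := by
  rw [beq_iff_eq, List.prefix_iff_eq_take, hc3]
  constructor
  · intro h
    have := congrArg String.toList h
    rw [PySem.Str.toList_slice, PySem.Chars.slice_eq_listSlice,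
      PySem.List.slice_toNat _ hi (by omega)] at this
    have h3 : (i + 3).toNat - i.toNat = 3 := by omega
    rw [h3] at this
    exact this.symm
  · intro h
    apply String.ext  -- strings equal when their data (toList) are
    rw [PySem.Str.toList_slice, PySem.Chars.slice_eq_listSlice,
      PySem.List.slice_toNat _ hi (by omega)]
    have h3 : (i + 3).toNat - i.toNat = 3 := by omega
    rw [h3]
    exact h.symm

-- First matching index in the range = Python's str.find result.
theorem find?_range_find (window c : String) (hc3 : c.toList.length = 3) :
    (PySem.List.pyRange 0 ((window.toList.length : Int) - 2) 1).find?
        (fun i => PySem.Str.slice window (some i) (some (i + 3)) == c)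
      = if PySem.Str.find window c = -1 then none else some (PySem.Str.find window c) := by
  rw [PySem.Str.find_eq]
  by_cases hf : PySem.Chars.find window.toList c.toList = -1
  · rw [if_pos hf, List.find?_eq_none]
    intro i hi hp
    have h0i : 0 ≤ i := (PySem.List.mem_pyRange_one.mp hi).1
    have hpre := (sliceB_iff window c hc3 i h0i).mp hp
    have hin : PySem.Chars.isIn c.toList window.toList = true :=
      (PySem.Chars.exists_prefix_drop_iff_isIn _ _).mp ⟨_, hpre⟩
    rw [PySem.Chars.find_eq_neg_one_iff] at hf
    exact hf ((PySem.Chars.isIn_iff_infix _ _).mp hin)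
  · rw [if_neg hf]
    have h0 : 0 ≤ PySem.Chars.find window.toList c.toList := by
      have := PySem.Chars.neg_one_le_find window.toList c.toList
      omega
    obtain ⟨hpre, hmin⟩ := PySem.Chars.find_spec h0
    have htn : ((PySem.Chars.find window.toList c.toList).toNat : Int)
        = PySem.Chars.find window.toList c.toList := Int.toNat_of_nonneg h0
    apply find?_first_sorted _ _ _ (PySem.List.pairwise_lt_pyRange_one 0 _)
    · have hlen := hpre.length_le
      rw [List.length_drop, hc3] at hlen
      rw [PySem.List.mem_pyRange_one]
      omega
    · exact (sliceB_iff window c hc3 _ h0).mpr hpre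
    · intro j hj hpj
      have h0j : 0 ≤ j := (PySem.List.mem_pyRange_one.mp hj).1
      have hprej := (sliceB_iff window c hc3 j h0j).mp hpj
      by_contra hlt
      exact hmin j.toNat (by omega) hprej

-- A's find loop and B's lookup loop agree when the table reflects str.find.
theorem loops_eq (start_index : Int) (window : String) (first : PySem.Dict String Int)
    (l : List String)
    (h : ∀ c ∈ l, first.get? c
      = if PySem.Str.find window c = -1 then none else some (PySem.Str.find window c)) :
    findLoopA start_index window l = lookupB start_index first l := by
  induction l with
  | nil => rfl
  | cons c rest ih =>
    have hc := h c List.mem_cons_self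
    by_cases hf : PySem.Str.find window c = -1
    · rw [findLoopA, lookupB, hc, if_pos hf]
      simp only [hf, ne_eq, not_true_eq_false, if_false]
      exact ih (fun c' hc' => h c' (List.mem_cons_of_mem _ hc'))
    · rw [findLoopA, lookupB, hc, if_neg hf, if_pos hf]

-- The scan table at any stop codon equals str.find (packaged for the main proof).
theorem scanB_get? (window c : String) (hc : codonsB.contains c = true)
    (hc3 : c.toList.length = 3) :
    (scanB window (PySem.List.pyRange 0 (PySem.Str.len window - 2) 1)).get? c
      = if PySem.Str.find window c = -1 then none else some (PySem.Str.find window c) := by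
  unfold scanB
  rw [get?_foldl_stepB window c hc, PySem.Dict.get?_empty, Option.none_or, PySem.Str.len_eq,
    find?_range_find window c hc3]

-- ===== VERDICT (by name: the statement is the Claim_ definition above) =====
theorem find_stop_codon_spec : Claim_equal_find_stop_codon := by
  intro sequence start_index search_range _hdom
  unfold Spec_find_stop_codon find_stop_codon find_stop_codon_alt
  apply loops_eq
  intro c hcmem
  have hcmem' : c = "taa" ∨ c = "tag" ∨ c = "tga" := by simpa [codonsB] using hcmem
  rcases hcmem' with rfl | rfl | rfl <;>
    exact scanB_get? _ _ (by decide) (by decide)
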